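-- pv_equiv track=rewrite | github.com/Joeavaib/oracl | protocols/tmp_s_v22.py | _violates_order
-- ===== SOURCE A (Python) =====
-- from typing import List, Optional
--
-- def _violates_order(types: List[str]) -> bool:
--     try:
--         v_index = types.index("V")
--         a_index = types.index("A")
--         c_index = len(types) - 1 - types[::-1].index("C")
--     except ValueError:
--         return True
--     if v_index != 0 or a_index != 1 or c_index != len(types) - 1:
--         return True
--     for idx, t in enumerate(types):
--         if idx <= a_index:
--             continue
--         if t == "E":
--             continue
--         if t == "B":
--             continue
--         if t == "C" and idx == c_index:
--             continue
--         return True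
--     seen_b = False
--     for t in types[a_index + 1 : c_index]:
--         if t == "E" and seen_b:
--             return True
--         if t == "B":
--             seen_b = True
--         if t not in {"E", "B"}:
--             return True
--     return False
-- ===== SOURCE B (Python) =====
-- def _drop_leading(xs, x):
--     """Return xs without its leading run of x."""
--     i = 0
--     while i < len(xs) and xs[i] == x:
--         i += 1
--     return xs[i:]
--
-- def _violates_order(types):
--     # A list is well ordered iff it matches the grammar  V A E* B* C.
--     if types[:2] != ["V", "A"]:
--         return True
--     return _drop_leading(_drop_leading(types[2:], "E"), "B") != ["C"]
-- ===== Notes on version B (the rewrite author's own statement) =====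
-- stated objective: simpler
-- what changed: B recognises the valid lists as exactly the grammar V A E* B* C: it checks the two-element prefix, strips the leading run of E then the leading run of B from the rest, and tests that only the single final C remains - no index scans, no try/except, no seen_b state machine and no per-element validation loops as in A.
import Mathlib
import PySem

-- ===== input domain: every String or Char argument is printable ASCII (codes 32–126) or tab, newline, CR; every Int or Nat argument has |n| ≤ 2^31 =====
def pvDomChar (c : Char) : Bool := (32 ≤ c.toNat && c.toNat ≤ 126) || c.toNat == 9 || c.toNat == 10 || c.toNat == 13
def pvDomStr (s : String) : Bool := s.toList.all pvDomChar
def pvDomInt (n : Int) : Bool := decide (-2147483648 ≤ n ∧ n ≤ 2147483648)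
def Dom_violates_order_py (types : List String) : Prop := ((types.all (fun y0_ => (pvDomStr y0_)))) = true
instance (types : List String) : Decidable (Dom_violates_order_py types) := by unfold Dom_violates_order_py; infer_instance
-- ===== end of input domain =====

-- B recognises the valid lists as exactly the grammar V A E* B* C (prefix check, strip the
-- leading run of E then of B, compare the remainder to ["C"]) instead of A's index scans,
-- try/except and two validation loops (objective: simpler).

-- ===== PORT A =====
-- first loop of A: `for idx, t in enumerate(types): …` with its early return True
def aLoop1 (aIdx cIdx : Int) : List (Int × String) → Bool
  | [] => false
  | (idx, t) :: rest =>
    if idx ≤ aIdx then aLoop1 aIdx cIdx rest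
    else if t == "E" then aLoop1 aIdx cIdx rest
    else if t == "B" then aLoop1 aIdx cIdx rest
    else if t == "C" && idx == cIdx then aLoop1 aIdx cIdx rest
    else true

-- second loop of A: `for t in types[a_index+1:c_index]: …` carrying seen_b
def aLoop2 : Bool → List String → Bool
  | _, [] => false
  | seenB, t :: rest =>
    if t == "E" && seenB then true
    else
      let seenB' := if t == "B" then true else seenB
      if !(t == "E" || t == "B") then true
      else aLoop2 seenB' rest

def violates_order_py (types : List String) : Bool :=
  -- try: the three .index calls; any ValueError (none) → return True
  match PySem.List.index? types "V", PySem.List.index? types "A",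
        PySem.List.index? ((PySem.List.slice? types none none (-1)).getD []) "C" with
  | some v, some a, some rc =>
      let cIdx : Int := (types.length : Int) - 1 - (rc : Int)
      if (v : Int) ≠ 0 ∨ (a : Int) ≠ 1 ∨ cIdx ≠ (types.length : Int) - 1 then true
      else if aLoop1 (a : Int) cIdx (PySem.List.enumerate types 0) then true
      else aLoop2 false (PySem.List.slice types (some ((a : Int) + 1)) (some cIdx))
  | _, _, _ => true

-- ===== PORT B =====
-- B's helper _drop_leading: recursively strip the leading run of x
def dropLeading : List String → String → List String
  | [], _ => []
  | y :: ys, x => if y == x then dropLeading ys x else y :: ys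

def violates_order_py_alt (types : List String) : Bool :=
  if PySem.List.slice types (some 0) (some 2) ≠ ["V", "A"] then true
  else dropLeading (dropLeading (PySem.List.slice types (some 2) none) "E") "B" != ["C"]

-- ===== PRECONDITION & SPEC =====
def Spec_violates_order_py (types : List String) (out : Bool) : Prop := out = violates_order_py_alt types
instance (types : List String) (out : Bool) : Decidable (Spec_violates_order_py types out) := by unfold Spec_violates_order_py; infer_instance

-- ===== CLAIM (what is proved, stated in full; the proofs are below) =====
def Claim_equal_violates_order_py : Prop := ∀ (types : List String), Dom_violates_order_py types → Spec_violates_order_py types (violates_order_py types)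

-- ===== LEMMAS AND PROOFS =====

-- A's second loop with seen_b already True accepts exactly a run of B's
theorem aLoop2_true (mid : List String) :
    aLoop2 true mid = (dropLeading (mid ++ ["C"]) "B" != ["C"]) := by
  induction mid with
  | nil => decide
  | cons t r ih =>
    by_cases hB : t = "B"
    · subst hB; simpa [aLoop2, dropLeading] using ih
    · by_cases hE : t = "E" <;> simp [aLoop2, dropLeading, hB, hE]

-- A's second loop equals B's strip-E-then-B-then-compare pattern check
theorem aLoop2_false (mid : List String) :
    aLoop2 false mid = (dropLeading (dropLeading (mid ++ ["C"]) "E") "B" != ["C"]) := by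
  induction mid with
  | nil => decide
  | cons t r ih =>
    by_cases hE : t = "E"
    · subst hE; simpa [aLoop2, dropLeading] using ih
    · by_cases hB : t = "B"
      · subst hB; simpa [aLoop2, dropLeading] using aLoop2_true r
      · simp [aLoop2, dropLeading, hB, hE]

-- dropLeading returns a suffix, so it preserves the last element
theorem dropLeading_getLast? (xs : List String) (x y : String)
    (h : (dropLeading xs x).getLast? = some y) : xs.getLast? = some y := by
  induction xs with
  | nil => simp [dropLeading] at h
  | cons z zs ih =>
    rw [dropLeading] at h
    by_cases hz : z = x
    · rw [if_pos (by simp [hz])] at h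
      have hzs := ih h
      cases zs with
      | nil => simp [dropLeading] at h
      | cons w ws => rw [List.getLast?_cons_cons]; exact hzs
    · rwa [if_neg (by simp [hz])] at h

-- if a list does not end in "C", A reports a violation
theorem lastNotC (types : List String) (h : types.getLast? ≠ some "C") :
    violates_order_py types = true := by
  rw [violates_order_py]
  cases hV : PySem.List.index? types "V" with
  | none => simp [hV]
  | some v =>
  cases hA : PySem.List.index? types "A" with
  | none => simp [hV, hA]
  | some a =>
  cases hC : PySem.List.index? ((PySem.List.slice? types none none (-1)).getD []) "C" with
  | none => simp [hV, hA, hC]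
  | some rc =>
    simp only [hV, hA, hC]
    rw [if_pos]
    rw [PySem.List.slice?_none_none_neg_one, Option.getD_some] at hC
    obtain ⟨hk, he, -⟩ := PySem.List.getElem_of_index?_eq_some hC
    have hrc : rc ≠ 0 := by
      intro h0
      subst h0
      apply h
      rw [← List.head?_reverse, List.head?_eq_getElem?, List.getElem?_eq_getElem hk, he]
    right; right
    omega

-- if the list does not start with "V","A", A reports a violation
theorem notVA (types : List String) (h : ∀ rest, types ≠ "V" :: "A" :: rest) :
    violates_order_py types = true := by
  rw [violates_order_py]
  cases hV : PySem.List.index? types "V" with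
  | none => simp [hV]
  | some v =>
  cases hA : PySem.List.index? types "A" with
  | none => simp [hV, hA]
  | some a =>
  cases hC : PySem.List.index? ((PySem.List.slice? types none none (-1)).getD []) "C" with
  | none => simp [hV, hA, hC]
  | some rc =>
    simp only [hV, hA, hC]
    rw [if_pos]
    by_contra hcond
    push_neg at hcond
    obtain ⟨hv0, ha1, -⟩ := hcond
    have hv0' : v = 0 := by exact_mod_cast hv0
    have ha1' : a = 1 := by exact_mod_cast ha1
    subst hv0' ha1'
    obtain ⟨hk0, he0, -⟩ := PySem.List.getElem_of_index?_eq_some hV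
    obtain ⟨hk1, he1, -⟩ := PySem.List.getElem_of_index?_eq_some hA
    match types, hk1 with
    | t0 :: t1 :: ts, _ =>
      simp at he0 he1
      exact h ts (by rw [he0, he1])

-- first loop of A over the enumerated tail: only E/B allowed before the final C
theorem loop1_eq (l : List String) : ∀ (s c : Int), 1 < s → s + l.length ≤ c →
    aLoop1 1 c (PySem.List.enumerate l s ++ [(c, "C")]) = l.any (fun t => !(t == "E" || t == "B")) := by
  induction l with
  | nil => intro s c hs hc; simp [PySem.List.enumerate, aLoop1]
  | cons t rest ih =>
    intro s c hs hc
    rw [PySem.List.enumerate_cons]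
    simp only [List.cons_append, aLoop1]
    have h1 : ¬ (s ≤ 1) := by omega
    have h2 : ¬ (s = c) := by simp at hc ⊢; omega
    by_cases hE : t = "E"
    · subst hE; simp [h1, ih (s+1) c (by omega) (by simp at hc ⊢; omega)]
    · by_cases hB : t = "B"
      · subst hB; simp [h1, ih (s+1) c (by omega) (by simp at hc ⊢; omega)]
      · simp [h1, hE, hB, h2]

theorem enumShape (mid : List String) : PySem.List.enumerate ("V" :: "A" :: (mid ++ ["C"])) 0
    = ((0:Int), "V") :: ((1:Int), "A") :: (PySem.List.enumerate mid 2 ++ [((mid.length : Int) + 2, "C")]) := by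
  rw [PySem.List.enumerate_cons, PySem.List.enumerate_cons, PySem.List.enumerate_append]
  norm_num [PySem.List.enumerate_cons, PySem.List.enumerate_nil]
  omega

-- a bad interior element is caught by both of A's loops identically
theorem anyBad_aLoop2 (mid : List String) :
    ∀ s, ((mid.any fun t => !(t == "E" || t == "B")) || aLoop2 s mid) = aLoop2 s mid := by
  induction mid with
  | nil => intro s; rfl
  | cons t r ih =>
    intro s
    by_cases hB : t = "B"
    · subst hB; simpa [aLoop2] using ih true
    · by_cases hE : t = "E"
      · subst hE
        cases s with
        | false => simpa [aLoop2] using ih false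
        | true => simp [aLoop2]
      · simp [aLoop2, hB, hE]

-- the well-shaped case V :: A :: mid ++ [C]
theorem caseP (mid : List String) :
    violates_order_py ("V" :: "A" :: (mid ++ ["C"])) = violates_order_py_alt ("V" :: "A" :: (mid ++ ["C"])) := by
  have hiA : PySem.List.index? ("V" :: "A" :: (mid ++ ["C"])) "A" = some 1 := by
    rw [PySem.List.index?_cons_of_ne _ (by decide), PySem.List.index?_cons_self]; rfl
  have hiC : PySem.List.index? (((PySem.List.slice? ("V" :: "A" :: (mid ++ ["C"])) none none (-1))).getD []) "C" = some 0 := by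
    rw [PySem.List.slice?_none_none_neg_one, Option.getD_some,
      show ("V" :: "A" :: (mid ++ ["C"])).reverse = "C" :: (mid.reverse ++ ["A", "V"]) by simp,
      PySem.List.index?_cons_self]
  have hlen : (("V" :: "A" :: (mid ++ ["C"])).length : Int) = (mid.length : Int) + 3 := by
    simp; ring
  have hA1 : aLoop1 ((1:Nat) : Int) ((mid.length : Int) + 2) (PySem.List.enumerate ("V" :: "A" :: (mid ++ ["C"])) 0)
      = mid.any (fun t => !(t == "E" || t == "B")) := by
    rw [enumShape]
    show aLoop1 1 _ _ = _
    rw [aLoop1, if_pos (by norm_num), aLoop1, if_pos (by norm_num)]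
    exact loop1_eq mid 2 ((mid.length : Int) + 2) (by norm_num) (by omega)
  have hslA : PySem.List.slice ("V" :: "A" :: (mid ++ ["C"])) (some (((1:Nat) : Int) + 1)) (some ((mid.length : Int) + 2)) = mid := by
    rw [show (((1:Nat):Int) + 1) = ((2:Nat):Int) by norm_num,
      show ((mid.length : Int) + 2) = ((mid.length + 2 : Nat) : Int) by push_cast; ring,
      PySem.List.slice_natCast]
    simp
  have halt : violates_order_py_alt ("V" :: "A" :: (mid ++ ["C"])) = aLoop2 false mid := by
    rw [violates_order_py_alt, if_neg, aLoop2_false,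
      show PySem.List.slice ("V" :: "A" :: (mid ++ ["C"])) (some 2) none = mid ++ ["C"] by
        rw [show (2:Int) = ((2:Nat):Int) from rfl, PySem.List.slice_from_natCast]; simp]
    push_neg
    rw [show (0:Int) = ((0:Nat):Int) from rfl]
    rw [show (2:Int) = ((2:Nat):Int) from rfl, PySem.List.slice_natCast]
    simp
  rw [violates_order_py, PySem.List.index?_cons_self, hiA, hiC]
  simp only [hlen, Nat.cast_one, Nat.cast_zero]
  rw [if_neg (by norm_num)]
  rw [show ((mid.length : Int) + 3 - 1 - 0) = ((mid.length : Int) + 2) by ring]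
  rw [show ((1:Int)) = ((1:Nat):Int) from rfl] at *
  rw [hA1, hslA, halt, ← anyBad_aLoop2 mid false]
  cases h : mid.any (fun t => !(t == "E" || t == "B")) <;> simp

theorem mainEq (types : List String) : violates_order_py types = violates_order_py_alt types := by
  by_cases hpre : ∃ rest, types = "V" :: "A" :: rest
  · obtain ⟨rest, rfl⟩ := hpre
    rcases eq_or_ne (rest.getLast?) (some "C") with hlast | hlast
    · obtain ⟨mid, rfl⟩ : ∃ mid, rest = mid ++ ["C"] := by
        cases rest with
        | nil => simp at hlast
        | cons r rs =>
          refine ⟨(r :: rs).dropLast, ?_⟩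
          have hne : (r :: rs) ≠ [] := by simp
          rw [List.getLast?_eq_some_getLast hne] at hlast
          have hdl := List.dropLast_append_getLast hne
          rw [Option.some.inj hlast] at hdl
          exact hdl.symm
      exact caseP mid
    · have hA : violates_order_py ("V" :: "A" :: rest) = true := by
        apply lastNotC
        cases rest with
        | nil => simp
        | cons r rs => simpa using hlast
      have hB : violates_order_py_alt ("V" :: "A" :: rest) = true := by
        rw [violates_order_py_alt]
        by_cases hg : PySem.List.slice ("V" :: "A" :: rest) (some 0) (some 2) ≠ ["V", "A"]
        · rw [if_pos hg]
        · rw [if_neg hg,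
            show PySem.List.slice ("V" :: "A" :: rest) (some 2) none = rest by
              rw [show (2:Int) = ((2:Nat):Int) from rfl, PySem.List.slice_from_natCast]; simp]
          simp only [bne_iff_ne, ne_eq, decide_eq_true_eq]
          intro hc
          have h1 : (dropLeading (dropLeading rest "E") "B").getLast? = some "C" := by
            rw [hc]; rfl
          exact hlast (dropLeading_getLast? _ _ _ (dropLeading_getLast? _ _ _ h1))
      rw [hA, hB]
  · push_neg at hpre
    have hA : violates_order_py types = true := notVA types hpre
    have hB : violates_order_py_alt types = true := by
      rw [violates_order_py_alt, if_pos]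
      rw [show (0:Int) = ((0:Nat):Int) from rfl, show (2:Int) = ((2:Nat):Int) from rfl,
        PySem.List.slice_natCast]
      simp only [List.drop_zero]
      intro hc
      exact hpre (types.drop 2) (by rw [← List.take_append_drop 2 types, hc]; simp)
    rw [hA, hB]

-- ===== VERDICT (by name: the statement is the Claim_ definition above) =====
theorem violates_order_py_spec : Claim_equal_violates_order_py := by
  intro types _
  unfold Spec_violates_order_py
  exact mainEq types
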